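-- pv_equiv track=rewrite | github.com/kaiyoo/NLP-Detect-Lexical-Blends | detect_blends.py | makeDinctionary
-- ===== SOURCE A (Python) =====
-- def makeDinctionary(fdicts):
--     dicts = {}
--     reversedicts = {}
--     ### in case of preventing key error
--     alphabet = 'abcdefghijklmnopqrstuvwxyz'
--     for letter in alphabet:
--         dicts[letter] = []
--     for letter in alphabet:
--         reversedicts[letter] = []
--
--     key = None
--     reverseKey = None
--     for line in fdicts:
--
--         line = line.strip()
--         key = line[0]
--         reverseKey = line[-1]
--
--         if not line:
--             key = None
--             reverseKey = None
--         elif not key or not key in dicts: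
--             dicts[key] = []
--         if not reverseKey or not reverseKey in reversedicts:
--             reversedicts[reverseKey] = []
--
--         dicts[key].append(line)
--         reversedicts[reverseKey].append(line[::-1])
--
--     for key in dicts:
--         dicts[key].sort()
--
--     for key in reversedicts:
--         reversedicts[key].sort()
--
--     return dicts, reversedicts
-- ===== SOURCE B (Python) =====
-- def makeDinctionary(fdicts):
--     # B: strip once, sort once, and build each dict by distributing the
--     # pre-sorted strings over an explicitly computed key list (alphabet +
--     # first-appearance extras); no per-bucket sorts.
--     alphabet = 'abcdefghijklmnopqrstuvwxyz'
--
--     def build(strs):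
--         keys = list(alphabet)
--         for s in strs:
--             c = s[0]
--             if c not in keys:
--                 keys.append(c)
--         ss = sorted(strs)
--         return {k: [s for s in ss if s[0] == k] for k in keys}
--
--     lines = [line.strip() for line in fdicts]
--     revs = [line[::-1] for line in lines]
--     return build(lines), build(revs)
-- ===== Notes on version B (the rewrite author's own statement) =====
-- stated objective: alternative
-- what changed: Instead of appending each line into per-letter buckets and then sorting every bucket, B sorts the stripped lines (and their reversals) once and builds each dict by filtering the pre-sorted list over an explicitly computed key list (alphabet + first-appearance extras), with no per-bucket sorts.
import Mathlib
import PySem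

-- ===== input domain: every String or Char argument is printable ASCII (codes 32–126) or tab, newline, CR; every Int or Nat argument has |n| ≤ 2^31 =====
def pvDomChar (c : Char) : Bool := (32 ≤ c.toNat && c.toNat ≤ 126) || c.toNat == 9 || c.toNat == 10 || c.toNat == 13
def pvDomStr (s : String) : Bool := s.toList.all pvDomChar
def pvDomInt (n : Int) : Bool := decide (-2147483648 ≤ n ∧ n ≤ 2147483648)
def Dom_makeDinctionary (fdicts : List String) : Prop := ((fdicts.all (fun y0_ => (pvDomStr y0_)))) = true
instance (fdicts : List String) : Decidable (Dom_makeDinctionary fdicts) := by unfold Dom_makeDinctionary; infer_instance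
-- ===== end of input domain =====

-- B strips once, sorts the stripped lines (and their reversals) once, and builds each
-- dict by distributing the pre-sorted strings over an explicitly computed key list
-- (alphabet + first-appearance extras) — no per-bucket sorts.  A mutates only its own
-- local dicts, never its argument.

-- ===== PORT A =====
-- shared primitives: the Python 1-char strings s[0] / s[-1], and s[::-1]
-- (s[::-1] is String.ofList s.toList.reverse by PySem.Str.slice?_none_none_neg_one; it never raises)
def pvHead1 (s : String) : Option String := (PySem.Str.pyGet? s 0).map (fun c => String.ofList [c])
def pvLast1 (s : String) : Option String := (PySem.Str.pyGet? s (-1)).map (fun c => String.ofList [c])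
def pvRev (s : String) : String := String.ofList s.toList.reverse
def pvAlphabet : List Char := ['a','b','c','d','e','f','g','h','i','j','k','l','m','n','o','p','q','r','s','t','u','v','w','x','y','z']

-- the body of A's main loop, updating the pair (dicts, reversedicts) with one line.
-- Notes: `if not line` is unreachable (line[0] has already raised IndexError on ""),
-- `not key` is never true for a 1-char string; the `_, _` branch is Python's
-- IndexError on an empty stripped line (outside Pre_).
def pvLoopBody (st : PySem.Dict String (List String) × PySem.Dict String (List String)) (line0 : String) :
    PySem.Dict String (List String) × PySem.Dict String (List String) :=
  let line := PySem.Str.strip line0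
  match pvHead1 line, pvLast1 line with
  | some key, some reverseKey =>
      let dicts := if st.1.contains key then st.1 else st.1.insert key []
      let reversedicts := if st.2.contains reverseKey then st.2 else st.2.insert reverseKey []
      (dicts.modify key [] (fun b => b ++ [line]),
       reversedicts.modify reverseKey [] (fun b => b ++ [pvRev line]))
  | _, _ => st

-- literal port of A: seed both dicts with the alphabet, one loop over the lines
-- updating both dicts, then sort every bucket in place.
def makeDinctionary (fdicts : List String) : (List (String × List String)) × (List (String × List String)) :=
  let dicts0 : PySem.Dict String (List String) :=
    pvAlphabet.foldl (fun d letter => d.insert (String.ofList [letter]) []) PySem.Dict.empty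
  let reversedicts0 : PySem.Dict String (List String) :=
    pvAlphabet.foldl (fun d letter => d.insert (String.ofList [letter]) []) PySem.Dict.empty
  let st := fdicts.foldl pvLoopBody (dicts0, reversedicts0)
  (st.1.items.map (fun p => (p.1, PySem.List.sorted p.2 (fun x => x) false)),
   st.2.items.map (fun p => (p.1, PySem.List.sorted p.2 (fun x => x) false)))

-- ===== PORT B =====
-- literal port of Source B's helper `build`: key list = alphabet + first-appearance extras,
-- sort once, then one filter per key (the `none` branch is Python's IndexError on "", outside Pre_).
def pvBuild (strs : List String) : List (String × List String) :=
  let keys : List String := strs.foldl (fun keys s =>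
      match pvHead1 s with
      | some c => if keys.contains c then keys else keys ++ [c]
      | none => keys) (pvAlphabet.map (fun c => String.ofList [c]))
  let ss := PySem.List.sorted strs (fun x => x) false
  keys.map (fun k => (k, ss.filter (fun s => pvHead1 s == some k)))

def makeDinctionary_alt (fdicts : List String) : (List (String × List String)) × (List (String × List String)) :=
  let lines := fdicts.map PySem.Str.strip
  let revs := lines.map pvRev
  (pvBuild lines, pvBuild revs)

-- ===== PRECONDITION & SPEC =====
-- Pre_ excludes exactly the inputs containing a line that strips to "": there Python A
-- raises IndexError at `line[0]` (and B raises at `s[0]` too).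
def Pre_makeDinctionary (fdicts : List String) : Prop :=
  ∀ s ∈ fdicts, PySem.Str.strip s ≠ ""
instance (fdicts : List String) : Decidable (Pre_makeDinctionary fdicts) := by unfold Pre_makeDinctionary; infer_instance
def pvWitness_makeDinctionary : List String := ["apple", "  Zebra! ", "dog", "3 dogs"]

def Spec_makeDinctionary (fdicts : List String) (out : (List (String × List String)) × (List (String × List String))) : Prop := out = makeDinctionary_alt fdicts
instance (fdicts : List String) (out : (List (String × List String)) × (List (String × List String))) : Decidable (Spec_makeDinctionary fdicts out) := by unfold Spec_makeDinctionary; infer_instance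

-- ===== CLAIM (what is proved, stated in full; the proofs are below) =====
def Claim_equal_makeDinctionary : Prop := ∀ (fdicts : List String), Dom_makeDinctionary fdicts → Pre_makeDinctionary fdicts → Spec_makeDinctionary fdicts (makeDinctionary fdicts)

-- ===== LEMMAS AND PROOFS =====

-- A's per-line update of one dict, abstracted over the string being filed
def pvAstep (d : PySem.Dict String (List String)) (s : String) : PySem.Dict String (List String) :=
  match pvHead1 s with
  | some k => (if d.contains k then d else d.insert k []).modify k [] (fun b => b ++ [s])
  | none => d

-- A's seed dict (the 26 alphabet buckets)
def pvD0 : PySem.Dict String (List String) :=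
  pvAlphabet.foldl (fun d letter => d.insert (String.ofList [letter]) []) PySem.Dict.empty

theorem pvHead1_rev (s : String) : pvHead1 (pvRev s) = pvLast1 s := by
  simp [pvHead1, pvLast1, pvRev, PySem.Str.pyGet?, PySem.List.pyGet?_neg_one,
    PySem.List.pyGet?_zero, ← List.head?_eq_getElem?, List.head?_reverse]

theorem pvHead1_none_iff (s : String) : pvHead1 s = none ↔ s.toList = [] := by
  simp [pvHead1, PySem.Str.pyGet?, PySem.List.pyGet?_zero, ← List.head?_eq_getElem?]

theorem pvLast1_none_iff (s : String) : pvLast1 s = none ↔ s.toList = [] := by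
  simp [pvLast1, PySem.Str.pyGet?, PySem.List.pyGet?_neg_one]

-- the loop body of A is pvAstep on the line paired with pvAstep on its reversal
theorem pvBody_eq (st : PySem.Dict String (List String) × PySem.Dict String (List String)) (line0 : String) :
    pvLoopBody st line0
    = (pvAstep st.1 (PySem.Str.strip line0), pvAstep st.2 (pvRev (PySem.Str.strip line0))) := by
  simp only [pvLoopBody]
  set t := PySem.Str.strip line0 with ht
  cases hh : pvHead1 t with
  | none =>
      have hl : pvLast1 t = none := (pvLast1_none_iff t).mpr ((pvHead1_none_iff t).mp hh)
      simp only [hh, hl, pvAstep, pvHead1_rev]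
  | some k =>
      cases hl : pvLast1 t with
      | none =>
          exact absurd hh (by simp [(pvHead1_none_iff t).mpr ((pvLast1_none_iff t).mp hl)])
      | some rk =>
          simp only [hh, hl, pvAstep, pvHead1_rev]

theorem pvLoopBody_eq : pvLoopBody = fun st line0 =>
    (pvAstep st.1 (PySem.Str.strip line0), pvAstep st.2 (pvRev (PySem.Str.strip line0))) := by
  funext st line0
  exact pvBody_eq st line0

theorem pvAstep_keys (d : PySem.Dict String (List String)) (s : String) (k : String)
    (hk : pvHead1 s = some k) : (pvAstep d s).keys = PySem.Set.add d.keys k := by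
  cases hc : d.contains k with
  | true =>
      simp only [pvAstep, hk]
      rw [PySem.Dict.keys_modify, if_pos hc, PySem.Dict.keys_insert_of_contains _ _ hc,
        PySem.Set.add_of_mem]
      rw [← PySem.Dict.contains_iff_mem_keys]; exact hc
  | false =>
      simp only [pvAstep, hk]
      rw [if_neg (by simp [hc]), PySem.Dict.keys_modify, PySem.Dict.insert_insert_self,
        PySem.Dict.keys_insert_of_not_contains _ _ hc, PySem.Set.add_of_not_mem]
      rw [← PySem.Dict.contains_iff_mem_keys]
      simp [hc]

theorem pvFold_keys (strs : List String) (d : PySem.Dict String (List String)) :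
    (strs.foldl pvAstep d).keys = PySem.Set.update d.keys (strs.filterMap pvHead1) := by
  induction strs generalizing d with
  | nil => simp [PySem.Set.update]
  | cons s rest ih =>
      cases hh : pvHead1 s with
      | none =>
          simp only [List.foldl_cons, List.filterMap_cons, hh]
          rw [show pvAstep d s = d by simp [pvAstep, hh]]
          exact ih d
      | some k =>
          simp only [List.foldl_cons, List.filterMap_cons, hh, PySem.Set.update_cons]
          rw [ih, pvAstep_keys d s k hh]

theorem pvAstep_getD (d : PySem.Dict String (List String)) (s : String) (k : String) :
    (pvAstep d s).getD k [] = d.getD k [] ++ (if pvHead1 s = some k then [s] else []) := by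
  cases hh : pvHead1 s with
  | none => simp [pvAstep, hh]
  | some k0 =>
      simp only [pvAstep, hh]
      cases hc : d.contains k0 with
      | true =>
          rw [if_pos rfl, PySem.Dict.getD_modify]
          by_cases hkk : k = k0
          · subst hkk; simp
          · simp [hkk, Ne.symm hkk]
      | false =>
          rw [if_neg (by simp), PySem.Dict.getD_modify]
          by_cases hkk : k = k0
          · subst hkk
            simp [PySem.Dict.getD_of_not_contains d _ hc]
          · simp [hkk, Ne.symm hkk, PySem.Dict.getD_insert]

theorem pvFold_getD (strs : List String) (d : PySem.Dict String (List String)) (k : String) :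
    (strs.foldl pvAstep d).getD k [] = d.getD k [] ++ strs.filter (fun s => pvHead1 s == some k) := by
  induction strs generalizing d with
  | nil => simp
  | cons s rest ih =>
      simp only [List.foldl_cons, List.filter_cons]
      rw [ih, pvAstep_getD]
      by_cases hkk : pvHead1 s = some k
      · simp [hkk]
      · simp [hkk]

theorem pvBkeys (strs : List String) (keys : List String) :
    (strs.foldl (fun keys s =>
      match pvHead1 s with
      | some c => if keys.contains c then keys else keys ++ [c]
      | none => keys) keys) = PySem.Set.update keys (strs.filterMap pvHead1) := by
  induction strs generalizing keys with
  | nil => simp [PySem.Set.update]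
  | cons s rest ih =>
      cases hh : pvHead1 s with
      | none => simp only [List.foldl_cons, List.filterMap_cons, hh]; exact ih keys
      | some c =>
          simp only [List.foldl_cons, List.filterMap_cons, hh, PySem.Set.update_cons]
          rw [ih]
          have hadd : (if keys.contains c = true then keys else keys ++ [c]) = PySem.Set.add keys c := by
            rw [PySem.Set.add_eq_ite]
            simp [List.contains_eq_mem]
          rw [hadd]

theorem pvD0_keys : pvD0.keys = pvAlphabet.map (fun c => String.ofList [c]) := by decide

theorem pvD0_nodup : pvD0.keys.Nodup := by decide

theorem pvGetD_alpha (cs : List Char) (d : PySem.Dict String (List String))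
    (h : ∀ k, d.getD k ([] : List String) = []) (k : String) :
    ((cs.foldl (fun d c => d.insert (String.ofList [c]) []) d).getD k []) = [] := by
  induction cs generalizing d with
  | nil => exact h k
  | cons c rest ih =>
      exact ih _ (fun k' => by rw [PySem.Dict.getD_insert]; split <;> simp [h])

theorem pvD0_getD (k : String) : pvD0.getD k [] = [] :=
  pvGetD_alpha _ _ (fun k' => by simp [PySem.Dict.getD_empty]) k

-- sorting then filtering is filtering then sorting (strings compare as themselves)
theorem pvSorted_filter (p : String → Bool) (strs : List String) :
    PySem.List.sorted (strs.filter p) (fun x => x) false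
      = (PySem.List.sorted strs (fun x => x) false).filter p :=
  PySem.List.sorted_id_eq_of_perm_of_pairwise _ _
    ((PySem.List.sorted_perm strs (fun x => x) false).filter p)
    ((PySem.List.sorted_pairwise strs (fun x => x)).filter p)

-- one side of A (fold pvAstep from the alphabet seed, then sort the buckets) is pvBuild
theorem pvMain (strs : List String) :
    ((strs.foldl pvAstep pvD0).items.map (fun p => (p.1, PySem.List.sorted p.2 (fun x => x) false)))
      = pvBuild strs := by
  have hnd : (strs.foldl pvAstep pvD0).keys.Nodup := by
    rw [pvFold_keys]
    exact PySem.Set.nodup_update _ _ pvD0_nodup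
  rw [PySem.Dict.items_eq_map_keys _ hnd ([] : List String), List.map_map]
  unfold pvBuild
  rw [pvBkeys, pvFold_keys, pvD0_keys]
  refine List.map_congr_left (fun k _ => ?_)
  simp only [Function.comp]
  rw [pvFold_getD, pvD0_getD, List.nil_append, pvSorted_filter]

-- ===== VERDICT (by name: the statement is the Claim_ definition above) =====
theorem makeDinctionary_spec : Claim_equal_makeDinctionary := by
  intro fdicts _ _
  show makeDinctionary fdicts = makeDinctionary_alt fdicts
  simp only [makeDinctionary, makeDinctionary_alt]
  rw [pvLoopBody_eq,
    show (pvAlphabet.foldl (fun d letter => d.insert (String.ofList [letter]) ([] : List String)) PySem.Dict.empty) = pvD0 from rfl,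
    PySem.List.foldl_prod_mk (f := fun d l0 => pvAstep d (PySem.Str.strip l0))
      (g := fun d l0 => pvAstep d (pvRev (PySem.Str.strip l0))) fdicts pvD0 pvD0]
  rw [show (List.foldl (fun d l0 => pvAstep d (PySem.Str.strip l0)) pvD0 fdicts)
        = ((fdicts.map PySem.Str.strip).foldl pvAstep pvD0) by rw [List.foldl_map],
      show (List.foldl (fun d l0 => pvAstep d (pvRev (PySem.Str.strip l0))) pvD0 fdicts)
        = (((fdicts.map PySem.Str.strip).map pvRev).foldl pvAstep pvD0) by
          rw [List.map_map, List.foldl_map]; simp [Function.comp]]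
  exact Prod.ext (pvMain _) (pvMain _)
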